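-- pv_equiv track=rewrite | github.com/k3llymariee/the-gi-pi | magic.py | return_ingredient_list
-- ===== SOURCE A (Python) =====
-- def return_ingredient_list(ingredient_str):
--
--     # replace all delimiters with commas
--     pre_split = ingredient_str.replace('(', ',')
--     pre_split = pre_split.replace('[', ',')
--     pre_split = pre_split.replace('.', ',')
--     pre_split = pre_split.replace(':', ',')
--
--     # replace all special characters with blanks
--     pre_split = pre_split.replace(')', '')
--     pre_split = pre_split.replace(']', '')
--     pre_split = pre_split.replace('*', '')
--
--     # replace all adjectives with blanks
--     pre_split = pre_split.replace('Organic', '')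
--     pre_split = pre_split.replace('Natural', '')
--
--     # split the list on commas
--     split_list = pre_split.split(',')
--
--     ingredient_list = []
--
--     for ingredient in split_list:
--         ingredient = ingredient.lower().strip()
--         if 'less than' in ingredient:
--             break # exit loop so we don't add anything after this
--         elif 'vitamins' in ingredient:
--             break
--         elif 'ingredients' in ingredient:
--             continue
--         elif 'contains' in ingredient:
--             continue
--         elif ingredient == '':
--             continue
--         else:
--             ingredient_list.append(ingredient)
--
--     return ingredient_list
-- ===== SOURCE B (Python) =====
-- def _remove(s, word):
--     # left-to-right non-overlapping removal of `word`, by an index scan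
--     out = []
--     i, n, total = 0, len(word), len(s)
--     while i < total:
--         if s.startswith(word, i):
--             i += n
--         else:
--             out.append(s[i])
--             i += 1
--     return ''.join(out)
--
--
-- def return_ingredient_list(ingredient_str):
--     # one character-level pass: delimiters become commas, specials are dropped
--     cleaned = []
--     for c in ingredient_str:
--         if c in ')]*':
--             continue
--         cleaned.append(',' if c in '([.:' else c)
--     s = ''.join(cleaned)
--
--     # remove the adjectives by a scanning pass each
--     s = _remove(s, 'Organic')
--     s = _remove(s, 'Natural')
--
--     # streaming tokenizer: emit a token at each comma (sentinel comma at the end)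
--     result = []
--     buf = []
--     for c in s + ',':
--         if c != ',':
--             buf.append(c)
--             continue
--         tok = ''.join(buf).lower().strip()
--         buf = []
--         if 'less than' in tok or 'vitamins' in tok:
--             return result
--         if tok and 'ingredients' not in tok and 'contains' not in tok:
--             result.append(tok)
--     return result
-- ===== Notes on version B (the rewrite author's own statement) =====
-- stated objective: alternative
-- what changed: A's nine whole-string replace passes, comma split and break/continue loop are replaced by a single character-level cleaning pass, two scanning substring removers for the two adjective words, and a streaming tokenizer that emits and classifies a token at each separator, with one sentinel separator at the end.
import Mathlib
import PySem

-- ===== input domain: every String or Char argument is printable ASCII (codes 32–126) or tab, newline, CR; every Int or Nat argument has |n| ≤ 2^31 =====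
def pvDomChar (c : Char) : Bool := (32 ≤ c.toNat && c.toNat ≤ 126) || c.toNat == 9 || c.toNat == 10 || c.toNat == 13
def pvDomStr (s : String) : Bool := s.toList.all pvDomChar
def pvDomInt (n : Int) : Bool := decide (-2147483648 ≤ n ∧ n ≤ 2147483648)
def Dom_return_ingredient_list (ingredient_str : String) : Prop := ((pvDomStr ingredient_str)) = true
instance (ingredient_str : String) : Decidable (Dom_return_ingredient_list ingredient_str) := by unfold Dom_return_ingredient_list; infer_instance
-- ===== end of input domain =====

-- B replaces A's nine whole-string replace passes + split + break/continue loop by a single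
-- character-level cleaning pass, two scanning substring removers, and a streaming tokenizer
-- that emits and classifies a token at each comma (alternative decomposition, same cost).

-- ===== PORT A =====
-- the chain of whole-string .replace passes
def pvPreSplit (ingredient_str : String) : String :=
  let pre_split := PySem.Str.replace ingredient_str "(" ","
  let pre_split := PySem.Str.replace pre_split "[" ","
  let pre_split := PySem.Str.replace pre_split "." ","
  let pre_split := PySem.Str.replace pre_split ":" ","
  let pre_split := PySem.Str.replace pre_split ")" ""
  let pre_split := PySem.Str.replace pre_split "]" ""
  let pre_split := PySem.Str.replace pre_split "*" ""
  let pre_split := PySem.Str.replace pre_split "Organic" ""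
  PySem.Str.replace pre_split "Natural" ""

-- A's for-loop with break/continue, accumulator = ingredient_list
def pvLoopA (acc : List String) : List String → List String
  | [] => acc
  | t :: rest =>
    let ingredient := PySem.Str.strip (PySem.Str.lower t)
    if PySem.Str.isIn "less than" ingredient then acc
    else if PySem.Str.isIn "vitamins" ingredient then acc
    else if PySem.Str.isIn "ingredients" ingredient then pvLoopA acc rest
    else if PySem.Str.isIn "contains" ingredient then pvLoopA acc rest
    else if ingredient == "" then pvLoopA acc rest
    else pvLoopA (acc ++ [ingredient]) rest

def return_ingredient_list (ingredient_str : String) : List String :=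
  -- split? is some since the separator "," is non-empty
  pvLoopA [] ((PySem.Str.split? (pvPreSplit ingredient_str) ",").getD [])

-- ===== PORT B =====
-- one pass over the characters: ')' ']' '*' dropped, '(' '[' '.' ':' become ','
def pvClean : List Char → List Char
  | [] => []
  | c :: t =>
    if c = ')' ∨ c = ']' ∨ c = '*' then pvClean t
    else (if c = '(' ∨ c = '[' ∨ c = '.' ∨ c = ':' then ',' else c) :: pvClean t

-- Source B's `_remove` while-loop over `rest`; the fuel is the initial length of `rest`
-- (each iteration shortens `rest`, so it never runs out for a non-empty word)
def pvRemoveGo (word : List Char) : Nat → List Char → List Char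
  | _, [] => []
  | 0, _ :: _ => []
  | fuel + 1, c :: t =>
    if word.isPrefixOf (c :: t) then pvRemoveGo word fuel ((c :: t).drop word.length)
    else c :: pvRemoveGo word fuel t

def pvRemove (word : String) (s : List Char) : List Char :=
  pvRemoveGo word.toList s.length s

-- streaming tokenizer: a token is emitted and classified at each comma
def pvStream : List Char → List Char → List String → List String
  | [], _, acc => acc
  | c :: rest, buf, acc =>
    if c != ',' then pvStream rest (buf ++ [c]) acc
    else
      let tok := PySem.Str.strip (PySem.Str.lower (String.ofList buf))
      if PySem.Str.isIn "less than" tok || PySem.Str.isIn "vitamins" tok then acc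
      else if tok != "" && !(PySem.Str.isIn "ingredients" tok) && !(PySem.Str.isIn "contains" tok)
      then pvStream rest [] (acc ++ [tok])
      else pvStream rest [] acc

def return_ingredient_list_alt (ingredient_str : String) : List String :=
  let cleaned := pvClean ingredient_str.toList
  let s := pvRemove "Organic" cleaned
  let s := pvRemove "Natural" s
  pvStream (s ++ [',']) [] []

-- ===== PRECONDITION & SPEC =====
def Spec_return_ingredient_list (ingredient_str : String) (out : List String) : Prop := out = return_ingredient_list_alt ingredient_str
instance (ingredient_str : String) (out : List String) : Decidable (Spec_return_ingredient_list ingredient_str out) := by unfold Spec_return_ingredient_list; infer_instance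

-- ===== CLAIM (what is proved, stated in full; the proofs are below) =====
def Claim_equal_return_ingredient_list : Prop := ∀ (ingredient_str : String), Dom_return_ingredient_list ingredient_str → Spec_return_ingredient_list ingredient_str (return_ingredient_list ingredient_str)

-- ===== LEMMAS AND PROOFS =====

-- structural characterization of splitting on a comma
def pvSplitList : List Char → List (List Char)
  | [] => [[]]
  | c :: t =>
    if c = ',' then [] :: pvSplitList t
    else match pvSplitList t with
      | [] => [[c]]
      | h :: r => (c :: h) :: r

theorem pvReplace_go_map (c d : Char) : ∀ (fuel : Nat) (l acc : List Char), l.length ≤ fuel →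
    PySem.Chars.replace.go [c] [d] fuel l acc
      = acc.reverse ++ l.map (fun x => if x = c then d else x) := by
  intro fuel
  induction fuel with
  | zero => intro l acc h; cases l with
    | nil => simp [PySem.Chars.replace.go]
    | cons a t => simp at h
  | succ f ih =>
    intro l acc h
    cases l with
    | nil => simp [PySem.Chars.replace.go]
    | cons a t =>
      rw [PySem.Chars.replace.go]
      by_cases hac : c = a
      · subst hac
        simp only [List.isPrefixOf, Bool.and_true, beq_self_eq_true, if_true, List.drop_succ_cons,
          List.length_cons, List.length_nil, List.drop_zero]
        rw [ih t _ (by simpa using h)]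
        simp
      · simp only [List.isPrefixOf, Bool.and_true]
        rw [if_neg (by simp [hac])]
        rw [ih t _ (by simpa using h)]
        simp [Ne.symm hac]

theorem pvReplace_map (c d : Char) (l : List Char) :
    PySem.Chars.replace l [c] [d] = l.map (fun x => if x = c then d else x) := by
  rw [PySem.Chars.replace]
  simp [pvReplace_go_map c d l.length l [] le_rfl]

theorem pvReplace_go_del (c : Char) : ∀ (fuel : Nat) (l acc : List Char), l.length ≤ fuel →
    PySem.Chars.replace.go [c] [] fuel l acc
      = acc.reverse ++ l.filter (fun x => !(x == c)) := by
  intro fuel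
  induction fuel with
  | zero => intro l acc h; cases l with
    | nil => simp [PySem.Chars.replace.go]
    | cons a t => simp at h
  | succ f ih =>
    intro l acc h
    cases l with
    | nil => simp [PySem.Chars.replace.go]
    | cons a t =>
      rw [PySem.Chars.replace.go]
      by_cases hac : c = a
      · subst hac
        simp only [List.isPrefixOf, Bool.and_true, beq_self_eq_true, if_true, List.drop_succ_cons,
          List.length_cons, List.length_nil, List.drop_zero]
        rw [ih t _ (by simpa using h)]
        simp
      · simp only [List.isPrefixOf, Bool.and_true]
        rw [if_neg (by simp [hac])]
        rw [ih t _ (by simpa using h)]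
        simp [Ne.symm hac]

theorem pvReplace_go_remove (w : List Char) (hw : w ≠ []) : ∀ (fuel : Nat) (l acc : List Char), l.length ≤ fuel →
    PySem.Chars.replace.go w [] fuel l acc = acc.reverse ++ pvRemoveGo w fuel l := by
  intro fuel
  induction fuel with
  | zero => intro l acc h; cases l with
    | nil => simp [PySem.Chars.replace.go, pvRemoveGo]
    | cons a t => simp at h
  | succ f ih =>
    intro l acc h
    cases l with
    | nil => simp [PySem.Chars.replace.go, pvRemoveGo]
    | cons a t =>
      rw [PySem.Chars.replace.go, pvRemoveGo]
      by_cases hp : w.isPrefixOf (a :: t)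
      · rw [if_pos hp, if_pos hp]
        have hw1 : 1 ≤ w.length := by cases w <;> simp_all
        have hlen : ((a :: t).drop w.length).length ≤ f := by
          simp [List.length_drop] at h ⊢; omega
        rw [ih _ _ hlen]
        simp
      · rw [if_neg hp, if_neg hp]
        rw [ih t _ (by simpa using h)]
        simp

theorem pvReplace_del (c : Char) (l : List Char) :
    PySem.Chars.replace l [c] [] = l.filter (fun x => !(x == c)) := by
  rw [PySem.Chars.replace]
  simp [pvReplace_go_del c l.length l [] le_rfl]

theorem pvReplace_remove (w : String) (hw : w.toList ≠ []) (l : List Char) :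
    PySem.Chars.replace l w.toList [] = pvRemove w l := by
  rw [PySem.Chars.replace, pvRemove]
  have : w.toList.isEmpty = false := by cases hwl : w.toList <;> simp_all
  rw [if_neg (by simp [this])]
  simpa using pvReplace_go_remove w.toList hw l.length l [] le_rfl

theorem pvClean_eq (l : List Char) :
    ((((((((l.map (fun x => if x = '(' then ',' else x)).map (fun x => if x = '[' then ',' else x)).map
        (fun x => if x = '.' then ',' else x)).map (fun x => if x = ':' then ',' else x)).filter
        (fun x => !(x == ')'))).filter (fun x => !(x == ']'))).filter (fun x => !(x == '*'))))
      = pvClean l := by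
  induction l with
  | nil => rfl
  | cons a t ih =>
    simp only [List.map_cons, List.filter_cons]
    rw [pvClean]
    by_cases hdel : a = ')' ∨ a = ']' ∨ a = '*'
    · rw [if_pos hdel]
      rcases hdel with h | h | h <;> subst h <;> simpa using ih
    · rw [if_neg hdel]
      push_neg at hdel
      obtain ⟨h1, h2, h3⟩ := hdel
      by_cases hmap : a = '(' ∨ a = '[' ∨ a = '.' ∨ a = ':'
      · rw [if_pos hmap]
        rcases hmap with h | h | h <;> (try subst h) <;> (try simpa using ih)
        rcases h with h | h <;> subst h <;> simpa using ih
      · rw [if_neg hmap]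
        push_neg at hmap
        obtain ⟨m1, m2, m3, m4⟩ := hmap
        refine Eq.trans ?_ (congrArg (List.cons a) ih)
        simp [m1, m2, m3, m4, h1, h2, h3]

theorem pvPreSplit_toList (s : String) :
    (pvPreSplit s).toList = pvRemove "Natural" (pvRemove "Organic" (pvClean s.toList)) := by
  unfold pvPreSplit
  simp only [PySem.Str.toList_replace]
  rw [show ("(".toList) = ['('] from rfl, show ("[".toList) = ['['] from rfl,
      show (".".toList) = ['.'] from rfl, show (":".toList) = [':'] from rfl,
      show (")".toList) = [')'] from rfl, show ("]".toList) = [']'] from rfl,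
      show ("*".toList) = ['*'] from rfl, show (",".toList) = [','] from rfl,
      show ("".toList) = ([] : List Char) from rfl]
  rw [pvReplace_map, pvReplace_map, pvReplace_map, pvReplace_map,
      pvReplace_del, pvReplace_del, pvReplace_del,
      pvReplace_remove "Organic" (by decide), pvReplace_remove "Natural" (by decide)]
  rw [pvClean_eq]


theorem pvModifyHead_id {α : Type} (l : List α) : l.modifyHead (fun x => x) = l := by
  cases l <;> simp

theorem pvSplitList_ne_nil : ∀ l, pvSplitList l ≠ [] := by
  intro l
  cases l with
  | nil => simp [pvSplitList]
  | cons c t =>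
    rw [pvSplitList]
    by_cases hc : c = ','
    · simp [hc]
    · rw [if_neg hc]
      cases h : pvSplitList t <;> simp

theorem pvSplitOn_go_eq : ∀ (fuel : Nat) (l cur : List Char) (acc : List (List Char)), l.length ≤ fuel →
    PySem.Chars.splitOn.go [','] fuel l cur acc
      = acc.reverse ++ (pvSplitList l).modifyHead (fun x => cur.reverse ++ x) := by
  intro fuel
  induction fuel with
  | zero =>
    intro l cur acc h
    cases l with
    | nil => simp [PySem.Chars.splitOn.go, pvSplitList]
    | cons a t => simp at h
  | succ f ih =>
    intro l cur acc h
    cases l with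
    | nil => simp [PySem.Chars.splitOn.go, pvSplitList]
    | cons a t =>
      rw [PySem.Chars.splitOn.go]
      by_cases hc : a = ','
      · subst hc
        rw [if_pos (by simp [List.isPrefixOf])]
        rw [ih _ _ _ (by simpa using h)]
        rw [pvSplitList]
        simp [pvModifyHead_id]
      · rw [if_neg (by simp [List.isPrefixOf, Ne.symm hc])]
        rw [ih _ _ _ (by simpa using h)]
        rw [pvSplitList, if_neg hc]
        rcases hsp : pvSplitList t with _ | ⟨hd, r⟩
        · exact absurd hsp (pvSplitList_ne_nil t)
        · simp

theorem pvSplitOn_eq (l : List Char) : PySem.Chars.splitOn l [','] = pvSplitList l := by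
  rw [PySem.Chars.splitOn]
  rw [pvSplitOn_go_eq (l.length + 1) l [] [] (by omega)]
  simp [pvModifyHead_id]

theorem pvSplitList_comma (t : List Char) : pvSplitList (',' :: t) = [] :: pvSplitList t := by
  rw [pvSplitList]; simp

theorem pvLoopA_cons (acc : List String) (t : String) (rest : List String) :
    pvLoopA acc (t :: rest) =
      (if PySem.Str.isIn "less than" (PySem.Str.strip (PySem.Str.lower t)) then acc
       else if PySem.Str.isIn "vitamins" (PySem.Str.strip (PySem.Str.lower t)) then acc
       else if PySem.Str.isIn "ingredients" (PySem.Str.strip (PySem.Str.lower t)) then pvLoopA acc rest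
       else if PySem.Str.isIn "contains" (PySem.Str.strip (PySem.Str.lower t)) then pvLoopA acc rest
       else if (PySem.Str.strip (PySem.Str.lower t)) == "" then pvLoopA acc rest
       else pvLoopA (acc ++ [PySem.Str.strip (PySem.Str.lower t)]) rest) := rfl

theorem pvStream_comma (rest buf : List Char) (acc : List String) :
    pvStream (',' :: rest) buf acc =
      (if PySem.Str.isIn "less than" (PySem.Str.strip (PySem.Str.lower (String.ofList buf)))
          || PySem.Str.isIn "vitamins" (PySem.Str.strip (PySem.Str.lower (String.ofList buf))) then acc
       else if (PySem.Str.strip (PySem.Str.lower (String.ofList buf))) != ""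
          && !(PySem.Str.isIn "ingredients" (PySem.Str.strip (PySem.Str.lower (String.ofList buf))))
          && !(PySem.Str.isIn "contains" (PySem.Str.strip (PySem.Str.lower (String.ofList buf))))
       then pvStream rest [] (acc ++ [PySem.Str.strip (PySem.Str.lower (String.ofList buf))])
       else pvStream rest [] acc) := by
  rw [pvStream]
  simp

theorem pvStream_eq : ∀ (l buf : List Char) (acc : List String),
    pvStream (l ++ [',']) buf acc
      = pvLoopA acc (((pvSplitList l).modifyHead (fun x => buf ++ x)).map String.ofList) := by
  intro l
  induction l with
  | nil =>
    intro buf acc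
    show pvStream [','] buf acc = pvLoopA acc [String.ofList (buf ++ [])]
    rw [pvStream_comma, pvLoopA_cons, List.append_nil]
    generalize PySem.Str.strip (PySem.Str.lower (String.ofList buf)) = tok
    by_cases h1 : PySem.Str.isIn "less than" tok = true <;>
    by_cases h2 : PySem.Str.isIn "vitamins" tok = true <;>
    by_cases h3 : PySem.Str.isIn "ingredients" tok = true <;>
    by_cases h4 : PySem.Str.isIn "contains" tok = true <;>
    by_cases h5 : (tok == "") = true <;>
    simp_all [pvStream, pvLoopA]
  | cons a t ih =>
    intro buf acc
    show pvStream (a :: (t ++ [','])) buf acc = _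
    by_cases hc : a = ','
    · subst hc
      rw [pvSplitList_comma]
      simp only [List.modifyHead_cons, List.map_cons, List.append_nil]
      rw [pvStream_comma, pvLoopA_cons]
      generalize PySem.Str.strip (PySem.Str.lower (String.ofList buf)) = tok
      by_cases h1 : PySem.Str.isIn "less than" tok = true <;>
      by_cases h2 : PySem.Str.isIn "vitamins" tok = true <;>
      by_cases h3 : PySem.Str.isIn "ingredients" tok = true <;>
      by_cases h4 : PySem.Str.isIn "contains" tok = true <;>
      by_cases h5 : (tok == "") = true <;>
      simp_all [pvModifyHead_id]
    · rw [pvStream]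
      rw [if_pos (by simp [hc])]
      rw [ih (buf ++ [a]) acc]
      rw [pvSplitList, if_neg hc]
      rcases hsp : pvSplitList t with _ | ⟨hd, r⟩
      · exact absurd hsp (pvSplitList_ne_nil t)
      · simp


-- ===== VERDICT (by name: the statement is the Claim_ definition above) =====
theorem return_ingredient_list_spec : Claim_equal_return_ingredient_list := by
  intro s _
  unfold Spec_return_ingredient_list return_ingredient_list return_ingredient_list_alt
  rw [PySem.Str.split?, PySem.Chars.split?]
  rw [if_neg (by decide)]
  rw [show (",".toList) = [','] from rfl]
  rw [pvSplitOn_eq, pvPreSplit_toList]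
  rw [pvStream_eq]
  simp [pvModifyHead_id]
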